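-- pv_equiv track=rewrite | github.com/hicklingd/project_euler_doug | 51.py | family
-- ===== SOURCE A (Python) =====
-- def family(number_22):
--     num_2=str(number_22)
--     num_22 = list(num_2)
--     d_num_22 = list(set(num_22))
--     for i in d_num_22:
--         num_22_n = num_22
--         num_22_n.remove(i)
--     to_9 = ['0','1','2','3','4','5','6','7','8','9']
--     num_perm = []
--     for num_d in num_22_n:
--         num_perm.append([num_2.replace(num_d,i) for i in to_9])
--     return num_perm
-- ===== SOURCE B (Python) =====
-- def family(number_22):
--     s = str(number_22)
--     seen = set()
--     out = []
--     for ch in s: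
--         if ch in seen:
--             out.append([s.replace(ch, d) for d in '0123456789'])
--         else:
--             seen.add(ch)
--     return out
-- ===== Notes on version B (the rewrite author's own statement) =====
-- stated objective: simpler
-- what changed: Replaces A's three passes (build the distinct-char set, destructively remove each distinct char's first occurrence through an alias, then loop again to build rows) with one guarded pass that keeps a 'seen' set and emits its ten replacement strings directly at each non-first occurrence.
import Mathlib
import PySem

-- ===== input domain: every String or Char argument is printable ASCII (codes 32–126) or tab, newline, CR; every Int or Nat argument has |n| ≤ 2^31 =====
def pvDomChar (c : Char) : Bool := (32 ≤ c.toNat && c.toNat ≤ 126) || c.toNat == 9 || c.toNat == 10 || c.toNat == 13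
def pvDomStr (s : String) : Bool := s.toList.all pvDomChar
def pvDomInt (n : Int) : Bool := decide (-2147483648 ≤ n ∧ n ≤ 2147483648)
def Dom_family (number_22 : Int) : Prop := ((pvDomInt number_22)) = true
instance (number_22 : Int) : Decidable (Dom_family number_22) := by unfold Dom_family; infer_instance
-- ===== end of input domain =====

-- B collapses A's three passes (set build, aliased remove loop, row-building loop) into one
-- guarded pass with a 'seen' set; same return value everywhere.

-- ===== PORT A =====
-- Python list.remove(v): removes the first occurrence of v. Exact whenever v occurs in the list
-- (Python raises ValueError otherwise, which is unreachable in A: each removed char is distinct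
-- and occurs in the list).
def removeFirst (v : Char) : List Char → List Char
  | [] => []
  | x :: xs => if x = v then xs else x :: removeFirst v xs

def family (number_22 : Int) : List (List String) :=
  let num_2 := PySem.Int.toStr number_22
  let num_22 := num_2.toList
  -- list(set(num_22)): Python's set iteration order is not modelled; the fold below removes the
  -- first occurrence of each DISTINCT char, and those removals commute, so the resulting list is
  -- independent of the iteration order. We use first-occurrence order (PySem.List.dedup).
  let d_num_22 := PySem.List.dedup num_22
  let num_22_n := d_num_22.foldl (fun l i => removeFirst i l) num_22
  let to_9 := ['0','1','2','3','4','5','6','7','8','9']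
  num_22_n.foldl (fun num_perm num_d =>
    num_perm ++ [to_9.map (fun i =>
      PySem.Str.replace num_2 (String.ofList [num_d]) (String.ofList [i]))]) []

-- ===== PORT B =====
def rowB (s : String) (c : Char) : List String :=
  "0123456789".toList.map (fun d => PySem.Str.replace s (String.ofList [c]) (String.ofList [d]))

def goB (s : String) (seen : PySem.Set Char) : List Char → List (List String)
  | [] => []
  | c :: cs =>
      if PySem.Set.contains seen c then rowB s c :: goB s seen cs
      else goB s (PySem.Set.add seen c) cs

def family_alt (number_22 : Int) : List (List String) :=
  let s := PySem.Int.toStr number_22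
  goB s PySem.Set.empty s.toList

-- ===== PRECONDITION & SPEC =====
def Spec_family (number_22 : Int) (out : List (List String)) : Prop := out = family_alt number_22
instance (number_22 : Int) (out : List (List String)) : Decidable (Spec_family number_22 out) := by unfold Spec_family; infer_instance

-- ===== CLAIM (what is proved, stated in full; the proofs are below) =====
def Claim_equal_family : Prop := ∀ (number_22 : Int), Dom_family number_22 → Spec_family number_22 (family number_22)

-- ===== LEMMAS AND PROOFS =====

-- the non-first occurrences of the chars of l (given chars already seen), in order
def nf (seen : PySem.Set Char) : List Char → List Char
  | [] => []
  | c :: cs => if PySem.Set.contains seen c then c :: nf seen cs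
               else nf (PySem.Set.add seen c) cs

-- the distinct chars of l not already in seen, in first-occurrence order
def newd (seen : PySem.Set Char) : List Char → List Char
  | [] => []
  | c :: cs => if PySem.Set.contains seen c then newd seen cs
               else c :: newd (PySem.Set.add seen c) cs

theorem add_of_mem {seen : PySem.Set Char} {c : Char} (h : c ∈ seen) :
    PySem.Set.add seen c = seen := by
  simp [PySem.Set.add, h]

theorem add_of_not_mem {seen : PySem.Set Char} {c : Char} (h : c ∉ seen) :
    PySem.Set.add seen c = seen ++ [c] := by
  simp [PySem.Set.add, h]

theorem foldl_add_eq_append_newd (l : List Char) (seen : PySem.Set Char) :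
    l.foldl PySem.Set.add seen = seen ++ newd seen l := by
  induction l generalizing seen with
  | nil => simp [newd]
  | cons c cs ih =>
    by_cases h : c ∈ seen
    · rw [List.foldl_cons, add_of_mem h, ih,
        show newd seen (c :: cs) = newd seen cs by
          simp [newd, h]]
    · rw [List.foldl_cons, add_of_not_mem h, ih,
        show newd seen (c :: cs) = c :: newd (PySem.Set.add seen c) cs by
          simp [newd, h],
        add_of_not_mem h]
      simp

theorem dedup_eq_newd (l : List Char) : PySem.List.dedup l = newd PySem.Set.empty l := by
  have := foldl_add_eq_append_newd l PySem.Set.empty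
  simpa [PySem.List.dedup, PySem.Set.empty, PySem.Set.ofList_eq_foldl] using this

theorem mem_newd_not_seen {d : Char} {l : List Char} {seen : PySem.Set Char}
    (h : d ∈ newd seen l) : d ∉ seen := by
  induction l generalizing seen with
  | nil => simp [newd] at h
  | cons c cs ih =>
    by_cases hc : c ∈ seen
    · exact ih (by simpa [newd, PySem.Set.contains_iff, hc] using h)
    · rcases (by simpa [newd, PySem.Set.contains_iff, hc] using h :
          d = c ∨ d ∈ newd (PySem.Set.add seen c) cs) with rfl | hm
      · exact hc
      · intro hd
        exact ih hm (by rw [add_of_not_mem hc]; simp [hd])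

theorem foldl_removeFirst_cons {ds : List Char} {c : Char}
    (h : ∀ d ∈ ds, d ≠ c) (cs : List Char) :
    ds.foldl (fun l i => removeFirst i l) (c :: cs) =
      c :: ds.foldl (fun l i => removeFirst i l) cs := by
  induction ds generalizing cs with
  | nil => rfl
  | cons d ds ih =>
    have hdc : c ≠ d := fun hh => (h d (by simp)) hh.symm
    simp only [List.foldl_cons, removeFirst, if_neg hdc]
    exact ih (fun x hx => h x (by simp [hx])) _

theorem foldl_removeFirst_newd (l : List Char) (seen : PySem.Set Char) :
    (newd seen l).foldl (fun acc c => removeFirst c acc) l = nf seen l := by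
  induction l generalizing seen with
  | nil => cases seen <;> rfl
  | cons c cs ih =>
    by_cases h : c ∈ seen
    · rw [show newd seen (c :: cs) = newd seen cs by
          simp [newd, h]]
      rw [foldl_removeFirst_cons (fun d hd => by
        intro he; exact mem_newd_not_seen hd (he ▸ h)) cs]
      rw [ih, show nf seen (c :: cs) = c :: nf seen cs by
        simp [nf, h]]
    · rw [show newd seen (c :: cs) = c :: newd (PySem.Set.add seen c) cs by
          simp [newd, h]]
      rw [List.foldl_cons, show removeFirst c (c :: cs) = cs from by simp [removeFirst]]
      rw [ih, show nf seen (c :: cs) = nf (PySem.Set.add seen c) cs by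
        simp [nf, h]]

theorem foldl_append_singleton_map {α β : Type} (f : α → β) (l : List α) (acc : List β) :
    l.foldl (fun a c => a ++ [f c]) acc = acc ++ l.map f := by
  induction l generalizing acc with
  | nil => simp
  | cons c cs ih => simp [List.foldl_cons, ih]

theorem goB_eq_map_nf (s : String) (seen : PySem.Set Char) (l : List Char) :
    goB s seen l = (nf seen l).map (rowB s) := by
  induction l generalizing seen with
  | nil => rfl
  | cons c cs ih =>
    by_cases h : c ∈ seen <;>
      simp [goB, nf, h, ih]

-- ===== VERDICT (by name: the statement is the Claim_ definition above) =====
theorem family_spec : Claim_equal_family := by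
  intro n _
  show family n = family_alt n
  simp only [family, family_alt]
  rw [dedup_eq_newd, foldl_removeFirst_newd, foldl_append_singleton_map,
      goB_eq_map_nf]
  simp [rowB]
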